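-- pv_equiv track=rewrite | github.com/Alexandroni07/CI-Tprocesso | CI&T/test5/test5.py | possibilities
-- ===== SOURCE A (Python) =====
-- from typing import List
--
-- def possibilities(word: str) -> List[str]:
--     # map of morse code
--     cod_morse = {
--         ".": "E",    "-": "T",
--         "..": "I",   ".-": "A",   "-.": "N",   "--": "M",
--         "...": "S",  "..-": "U",  ".-.": "R",  ".--": "W",
--         "-..": "D",  "-.-": "K",  "--.": "G",  "---": "O"
--     }
--
--     # initialize to build combinations
--     pos = [""]
--
--     for s in word:
--         new_pos = []
--         for combination in pos:
--             # if the character is a wildcard, branch into both dot and dash possibilities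
--             if s == "?":
--                 new_pos.append(combination + ".")
--                 new_pos.append(combination + "-")
--             else:
--                 new_pos.append(combination + s)
--         pos = new_pos
--
--     # translate all generated morse sequences into characters and filter
--     result = [cod_morse[code] for code in pos if code in cod_morse]
--
--     return result
-- ===== SOURCE B (Python) =====
-- from typing import List
--
-- def possibilities(word: str) -> List[str]:
--     # Morse dichotomy tree packed into a string: starting at index 0,
--     # '.' goes to 2*i+1, '-' goes to 2*i+2; the letter is table[i].
--     # No dict and no candidate-code strings are ever built.
--     table = " ETIANMSURWDKGO"
--     n = len(word)
--     if n == 0 or n > 3: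
--         return []
--     out = []
--     def go(i: int, idx: int) -> None:
--         if i == n:
--             out.append(table[idx])
--             return
--         c = word[i]
--         if c == '.' or c == '?':
--             go(i + 1, 2 * idx + 1)
--         if c == '-' or c == '?':
--             go(i + 1, 2 * idx + 2)
--     go(0, 0)
--     return out
-- ===== Notes on version B (the rewrite author's own statement) =====
-- stated objective: faster
-- what changed: Replaces A's exponential wildcard expansion (building 2^k candidate code strings and filtering them through a dict) by a recursive walk of the morse dichotomy tree packed into a 15-char string (index 0, '.'->2i+1, '-'->2i+2, '?' takes both branches dot-first), emitting letters directly; no dict and no candidate strings are built, and dot-first branching reproduces A's output order.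
import Mathlib
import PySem

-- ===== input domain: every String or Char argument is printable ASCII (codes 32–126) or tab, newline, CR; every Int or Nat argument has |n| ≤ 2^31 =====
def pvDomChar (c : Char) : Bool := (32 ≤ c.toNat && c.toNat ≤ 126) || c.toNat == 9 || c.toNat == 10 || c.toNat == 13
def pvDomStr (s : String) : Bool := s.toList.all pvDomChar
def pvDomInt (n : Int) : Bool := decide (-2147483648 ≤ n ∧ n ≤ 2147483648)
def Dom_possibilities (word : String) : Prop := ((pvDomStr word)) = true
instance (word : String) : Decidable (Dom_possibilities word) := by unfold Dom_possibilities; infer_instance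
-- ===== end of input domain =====

-- B replaces A's exponential wildcard expansion (2^k candidate codes filtered through a
-- dict) by a recursive walk of the morse dichotomy tree packed into a 15-char string:
-- faster, and no candidate code strings are ever built.

-- ===== PORT A =====
-- the cod_morse dict of A, in insertion order (codes as List Char)
def morseTable : List (List Char × String) :=
  [(['.'], "E"), (['-'], "T"),
   (['.','.'], "I"), (['.','-'], "A"), (['-','.'], "N"), (['-','-'], "M"),
   (['.','.','.'], "S"), (['.','.','-'], "U"), (['.','-','.'], "R"), (['.','-','-'], "W"),
   (['-','.','.'], "D"), (['-','.','-'], "K"), (['-','-','.'], "G"), (['-','-','-'], "O")]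

-- dict lookup: first (here: only) matching key, scanning the association list
def pyLookup : List (List Char × String) → List Char → Option String
  | [], _ => none
  | e :: rest, code => if e.1 = code then some e.2 else pyLookup rest code

def aLookup (code : List Char) : Option String := pyLookup morseTable code

-- the inner 'for combination in pos' loop body of one outer-loop step
def aStep (pos : List (List Char)) (s : Char) : List (List Char) :=
  pos.flatMap (fun combination =>
    if s = '?' then [combination ++ ['.'], combination ++ ['-']]
    else [combination ++ [s]])

def possibilities (word : String) : List String :=
  let pos := word.toList.foldl aStep [[]]
  pos.filterMap (fun code => aLookup code)

-- ===== PORT B =====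
-- the dichotomy-tree string " ETIANMSURWDKGO" of Source B
def tableB : List Char := [' ','E','T','I','A','N','M','S','U','R','W','D','K','G','O']

-- Source B's recursive 'go': remaining word characters + current tree index;
-- the index is always ≤ 14 here (word length ≤ 3), so getD's default is never used
def goB : List Char → Nat → List String
  | [], idx => [String.mk [tableB.getD idx ' ']]
  | c :: rest, idx =>
      (if c = '.' ∨ c = '?' then goB rest (2 * idx + 1) else []) ++
      (if c = '-' ∨ c = '?' then goB rest (2 * idx + 2) else [])

def possibilities_alt (word : String) : List String :=
  if word.toList.length = 0 ∨ word.toList.length > 3 then []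
  else goB word.toList 0

-- ===== PRECONDITION & SPEC =====
def Spec_possibilities (word : String) (out : List String) : Prop := out = possibilities_alt word
instance (word : String) (out : List String) : Decidable (Spec_possibilities word out) := by unfold Spec_possibilities; infer_instance

-- ===== CLAIM (what is proved, stated in full; the proofs are below) =====
def Claim_equal_possibilities : Prop := ∀ (word : String), Dom_possibilities word → Spec_possibilities word (possibilities word)

-- ===== LEMMAS AND PROOFS =====

-- every element of the expansion extends some element of the initial pos
lemma foldl_aStep_prefix : ∀ (w : List Char) (pos : List (List Char)) (p : List Char),
    p ∈ List.foldl aStep pos w → ∃ q ∈ pos, q <+: p := by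
  intro w
  induction w with
  | nil => intro pos p hp; exact ⟨p, by simpa using hp, List.prefix_refl p⟩
  | cons s w ih =>
    intro pos p hp
    rw [List.foldl_cons] at hp
    obtain ⟨q', hq', hpre⟩ := ih (aStep pos s) p hp
    rw [aStep, List.mem_flatMap] at hq'
    obtain ⟨q, hq, hmem⟩ := hq'
    refine ⟨q, hq, ?_⟩
    by_cases hs : s = '?' <;> simp [hs] at hmem
    · rcases hmem with h | h <;> subst h <;> exact (List.prefix_append _ _).trans hpre
    · subst hmem; exact (List.prefix_append _ _).trans hpre

-- every non-wildcard character of the word occurs in every generated code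
lemma foldl_aStep_mem : ∀ (w : List Char) (pos : List (List Char)) (p : List Char),
    p ∈ List.foldl aStep pos w → ∀ s ∈ w, s ≠ '?' → s ∈ p := by
  intro w
  induction w with
  | nil => intro pos p hp s hs; simp at hs
  | cons s0 w ih =>
    intro pos p hp s hs hsne
    rw [List.foldl_cons] at hp
    rcases List.mem_cons.mp hs with h | h
    · obtain ⟨q', hq', hpre⟩ := foldl_aStep_prefix w (aStep pos s0) p hp
      rw [aStep, List.mem_flatMap] at hq'
      obtain ⟨q, hq, hmem⟩ := hq'
      have hs0 : ¬ (s0 = '?') := fun e => hsne (h.trans e)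
      rw [if_neg hs0] at hmem
      simp only [List.mem_singleton] at hmem
      subst hmem
      exact hpre.subset (by simp [h])
    · exact ih (aStep pos s0) p hp s h hsne

-- every code generated by the expansion loop has length = |pos element| + |remaining word|
lemma aStep_foldl_length : ∀ (w : List Char) (pos : List (List Char)) (p : List Char),
    p ∈ w.foldl aStep pos → ∃ q ∈ pos, p.length = q.length + w.length := by
  intro w
  induction w with
  | nil => intro pos p hp; exact ⟨p, by simpa using hp, by simp⟩
  | cons s w ih =>
    intro pos p hp
    rw [List.foldl_cons] at hp
    obtain ⟨q, hq, hlen⟩ := ih (aStep pos s) p hp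
    rw [aStep, List.mem_flatMap] at hq
    obtain ⟨c0, hc0, hq2⟩ := hq
    refine ⟨c0, hc0, ?_⟩
    have hql : q.length = c0.length + 1 := by
      by_cases hs : s = '?' <;> simp [hs] at hq2
      · rcases hq2 with h | h <;> subst h <;> simp
      · subst hq2; simp
    simp only [List.length_cons]
    omega

set_option maxRecDepth 8000 in
lemma table_lens : ∀ e ∈ morseTable, e.1.length ≤ 3 := by decide

lemma pyLookup_long : ∀ (t : List (List Char × String)) (code : List Char),
    (∀ e ∈ t, e.1.length ≤ 3) → 4 ≤ code.length → pyLookup t code = none := by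
  intro t
  induction t with
  | nil => intro code _ _; rfl
  | cons e rest ih =>
    intro code ht hcode
    rw [pyLookup]
    rw [if_neg]
    · exact ih code (fun e' he' => ht e' (List.mem_cons_of_mem _ he')) hcode
    · intro hk
      have := ht e (by simp)
      rw [hk] at this
      omega

lemma aLookup_long (code : List Char) (h : 4 ≤ code.length) : aLookup code = none :=
  pyLookup_long morseTable code table_lens h

-- a successful dict lookup means the code consists of dots and dashes only
lemma table_chars : ∀ e ∈ morseTable, ∀ ch ∈ e.1, ch = '.' ∨ ch = '-' := by
  simp [morseTable]

lemma pyLookup_chars : ∀ (t : List (List Char × String)) (code : List Char) (l : String),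
    (∀ e ∈ t, ∀ ch ∈ e.1, ch = '.' ∨ ch = '-') → pyLookup t code = some l →
    ∀ ch ∈ code, ch = '.' ∨ ch = '-' := by
  intro t
  induction t with
  | nil => intro code l _ h; exact absurd h (by simp [pyLookup])
  | cons e rest ih =>
    intro code l ht h
    rw [pyLookup] at h
    split_ifs at h with hk
    · exact hk ▸ ht e (by simp)
    · exact ih code l (fun e' he' => ht e' (List.mem_cons_of_mem _ he')) h

lemma aLookup_chars (code : List Char) (l : String) (h : aLookup code = some l) :
    ∀ ch ∈ code, ch = '.' ∨ ch = '-' :=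
  pyLookup_chars morseTable code l table_chars h

-- a word containing a character other than '.', '-', '?' yields [] in A
lemma A_nil_of_bad (word : String) (s : Char) (hs : s ∈ word.toList)
    (h1 : s ≠ '?') (h2 : s ≠ '.') (h3 : s ≠ '-') : possibilities word = [] := by
  simp only [possibilities]
  apply List.filterMap_eq_nil_iff.mpr
  intro code hcode
  cases h : aLookup code with
  | none => rfl
  | some l =>
    exfalso
    have hm : s ∈ code := foldl_aStep_mem word.toList [[]] code hcode s hs h1
    rcases aLookup_chars code l h s hm with h' | h'
    · exact h2 h'
    · exact h3 h'

-- a list containing a character other than '.', '-', '?' gives [] in B's tree walk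
lemma goB_nil_of_bad : ∀ (l : List Char) (idx : Nat) (s : Char), s ∈ l →
    s ≠ '?' → s ≠ '.' → s ≠ '-' → goB l idx = [] := by
  intro l
  induction l with
  | nil => intro idx s hs; simp at hs
  | cons c rest ih =>
    intro idx s hs h1 h2 h3
    rcases List.mem_cons.mp hs with h | h
    · subst h
      rw [goB, if_neg (by tauto), if_neg (by tauto)]
      rfl
    · rw [goB]
      rcases Decidable.em (c = '.' ∨ c = '?') with hc | hc <;>
        rcases Decidable.em (c = '-' ∨ c = '?') with hd | hd <;>
        simp [hc, hd, ih _ s h h1 h2 h3]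

lemma B_nil_of_bad (word : String) (s : Char) (hs : s ∈ word.toList)
    (h1 : s ≠ '?') (h2 : s ≠ '.') (h3 : s ≠ '-') : possibilities_alt word = [] := by
  rw [possibilities_alt]
  split_ifs with hl
  · rfl
  · exact goB_nil_of_bad word.toList 0 s hs h1 h2 h3

-- ===== VERDICT (by name: the statement is the Claim_ definition above) =====
theorem possibilities_spec : Claim_equal_possibilities := by
  intro word _
  unfold Spec_possibilities
  by_cases hgood : ∀ s ∈ word.toList, s = '?' ∨ s = '.' ∨ s = '-'
  · rcases hw : word.toList with _ | ⟨a, _ | ⟨b, _ | ⟨c, _ | ⟨d, rest⟩⟩⟩⟩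
    -- length 0
    · simp only [possibilities, possibilities_alt, hw]; decide
    -- length 1
    · rw [hw] at hgood
      rcases hgood a (by simp) with ha | ha | ha <;> subst_vars <;>
        simp only [possibilities, possibilities_alt, hw] <;> decide
    -- length 2
    · rw [hw] at hgood
      rcases hgood a (by simp) with ha | ha | ha <;>
        rcases hgood b (by simp) with hb | hb | hb <;> subst_vars <;>
        simp only [possibilities, possibilities_alt, hw] <;> decide
    -- length 3
    · rw [hw] at hgood
      rcases hgood a (by simp) with ha | ha | ha <;>
        rcases hgood b (by simp) with hb | hb | hb <;>
        rcases hgood c (by simp) with hc | hc | hc <;> subst_vars <;>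
        simp only [possibilities, possibilities_alt, hw] <;> decide
    -- length ≥ 4: no code is that long, both sides are []
    · have hA : possibilities word = [] := by
        simp only [possibilities]
        apply List.filterMap_eq_nil_iff.mpr
        intro code hcode
        obtain ⟨q, hq, hlen⟩ := aStep_foldl_length word.toList [[]] code hcode
        simp only [List.mem_singleton] at hq
        subst hq
        rw [hw] at hlen
        simp at hlen
        exact aLookup_long code (by omega)
      have hB : possibilities_alt word = [] := by
        rw [possibilities_alt, if_pos]
        rw [hw]
        simp
      rw [hA, hB]
  · push_neg at hgood
    obtain ⟨s, hs, h1, h2, h3⟩ := hgood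
    rw [A_nil_of_bad word s hs h1 h2 h3, B_nil_of_bad word s hs h1 h2 h3]
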